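-- pv_equiv track=rewrite | github.com/baiwan-chenhao/rewrite | leetcode_gen_week4.py | solve
-- ===== SOURCE A (Python) =====
-- from typing import List, Tuple
--
-- def solve(nums: List[int], k: int, op1: int, op2: int) -> int:
--     n = len(nums)
--     f = [[[0] * (op2 + 1) for _ in range(op1 + 1)] for _ in range(n + 1)]
--     for i, x in enumerate(nums):
--         for p in range(op1 + 1):
--             for q in range(op2 + 1):
--                 res = f[i][p][q] + x
--                 if p:
--                     res = min(res, f[i][p - 1][q] + (x + 1) // 2)
--                 if q and x >= k:
--                     res = min(res, f[i][p][q - 1] + x - k)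
--                     if p:
--                         y = (x + 1) // 2 - k if (x + 1) // 2 >= k else (x - k + 1) // 2
--                         res = min(res, f[i][p - 1][q - 1] + y)
--                 f[i + 1][p][q] = res
--     return f[n][op1][op2]
-- ===== SOURCE B (Python) =====
-- from typing import List
--
--
-- def solve(nums: List[int], k: int, op1: int, op2: int) -> int:
--     # Top-down memoized recursion over the prefix length instead of A's
--     # bottom-up 3D table: dfs(i, p, q) = minimum achievable sum of nums[:i]
--     # with p halvings and q subtractions still available.
--     memo = {}
--
--     def dfs(i: int, p: int, q: int) -> int:
--         if i == 0:
--             return 0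
--         key = (i, p, q)
--         if key not in memo:
--             x = nums[i - 1]
--             best = dfs(i - 1, p, q) + x
--             if p:
--                 best = min(best, dfs(i - 1, p - 1, q) + (x + 1) // 2)
--             if q and x >= k:
--                 best = min(best, dfs(i - 1, p, q - 1) + x - k)
--                 if p:
--                     h = (x + 1) // 2
--                     y = h - k if h >= k else (x - k + 1) // 2
--                     best = min(best, dfs(i - 1, p - 1, q - 1) + y)
--             memo[key] = best
--         return memo[key]
--
--     return dfs(len(nums), op1, op2)
-- ===== Notes on version B (the rewrite author's own statement) =====
-- stated objective: alternative
-- what changed: Replaces A's bottom-up triple-loop over a preallocated (n+1)x(op1+1)x(op2+1) table with top-down memoized recursion on the prefix length (memo dict keyed by (i,p,q)), visiting only reachable states.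
import Mathlib
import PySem

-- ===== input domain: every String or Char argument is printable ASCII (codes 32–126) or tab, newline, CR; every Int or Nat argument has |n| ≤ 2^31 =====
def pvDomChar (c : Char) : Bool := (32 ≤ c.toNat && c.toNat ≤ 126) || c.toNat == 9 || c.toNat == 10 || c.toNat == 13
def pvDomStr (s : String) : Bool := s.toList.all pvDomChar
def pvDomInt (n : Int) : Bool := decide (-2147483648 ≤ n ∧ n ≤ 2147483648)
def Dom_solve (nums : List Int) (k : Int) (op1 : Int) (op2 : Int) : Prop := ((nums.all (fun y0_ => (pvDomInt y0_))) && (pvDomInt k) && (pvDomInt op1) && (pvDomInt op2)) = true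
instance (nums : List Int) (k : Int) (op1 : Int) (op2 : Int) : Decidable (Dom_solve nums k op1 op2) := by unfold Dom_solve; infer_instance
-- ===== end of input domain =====

-- B replaces A's bottom-up 3D table with top-down memoized recursion over the prefix length (objective: alternative; same O(n·op1·op2) state count).

-- ===== PORT A =====
-- f[i][p][q] read; inside A's loops all three indices are ≥ 0 and in range, so plain Nat getD is exact there
def pvGet3 (f : List (List (List Int))) (i p q : Int) : Int :=
  ((f.getD i.toNat []).getD p.toNat []).getD q.toNat 0

-- f[i][p][q] = v; inside A's loops all three indices are ≥ 0 and in range, so plain Nat set is exact there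
def pvSet3 (f : List (List (List Int))) (i p q : Int) (v : Int) : List (List (List Int)) :=
  f.set i.toNat ((f.getD i.toNat []).set p.toNat (((f.getD i.toNat []).getD p.toNat []).set q.toNat v))

-- the body of A's innermost loop computing `res`
def pvRes (f : List (List (List Int))) (k i x p q : Int) : Int :=
  let res := pvGet3 f i p q + x
  let res := if p ≠ 0 then min res (pvGet3 f i (p-1) q + PySem.Int.floordiv (x+1) 2) else res
  if q ≠ 0 ∧ x ≥ k then
    let res := min res (pvGet3 f i p (q-1) + x - k)
    if p ≠ 0 then
      let y := if PySem.Int.floordiv (x+1) 2 ≥ k then PySem.Int.floordiv (x+1) 2 - k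
               else PySem.Int.floordiv (x-k+1) 2
      min res (pvGet3 f i (p-1) (q-1) + y)
    else res
  else res

def solve (nums : List Int) (k : Int) (op1 : Int) (op2 : Int) : Int :=
  let n : Int := nums.length
  let f0 := List.replicate (n+1).toNat (List.replicate (op1+1).toNat (List.replicate (op2+1).toNat (0 : Int)))
  let f := (PySem.List.enumerate nums 0).foldl (fun f ix =>
      (PySem.List.pyRange 0 (op1+1) 1).foldl (fun f p =>
        (PySem.List.pyRange 0 (op2+1) 1).foldl (fun f q =>
          pvSet3 f (ix.1+1) p q (pvRes f k ix.1 ix.2 p q)) f) f) f0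
  -- f[n][op1][op2]: exact for 0 ≤ op1, 0 ≤ op2 (Pre_); Python raises IndexError otherwise
  pvGet3 f n op1 op2

-- ===== PORT B =====
-- dfs(i, p, q) with the memo dict threaded through; i is the prefix length (nums[i-1] is in range whenever i ≥ 1)
def solveAltGo (nums : List Int) (k : Int) :
    Nat → Int → Int → PySem.Dict (Int × Int × Int) Int → Int × PySem.Dict (Int × Int × Int) Int
  | 0, _, _, memo => (0, memo)
  | i+1, p, q, memo =>
    match memo.get? (((i : Int)+1), p, q) with
    | some v => (v, memo)
    | none =>
      let x := nums.getD i 0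
      let r1 := solveAltGo nums k i p q memo
      let best1 := r1.1 + x
      let s2 := if p ≠ 0 then
          let r2 := solveAltGo nums k i (p-1) q r1.2
          (min best1 (r2.1 + PySem.Int.floordiv (x+1) 2), r2.2)
        else (best1, r1.2)
      let s3 := if q ≠ 0 ∧ x ≥ k then
          let r3 := solveAltGo nums k i p (q-1) s2.2
          let b3 := min s2.1 (r3.1 + x - k)
          if p ≠ 0 then
            let h := PySem.Int.floordiv (x+1) 2
            let y := if h ≥ k then h - k else PySem.Int.floordiv (x-k+1) 2
            let r4 := solveAltGo nums k i (p-1) (q-1) r3.2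
            (min b3 (r4.1 + y), r4.2)
          else (b3, r3.2)
        else s2
      (s3.1, s3.2.insert (((i : Int)+1), p, q) s3.1)

def solve_alt (nums : List Int) (k : Int) (op1 : Int) (op2 : Int) : Int :=
  (solveAltGo nums k nums.length op1 op2 PySem.Dict.empty).1

-- ===== PRECONDITION & SPEC =====
-- Pre_ excludes exactly the inputs where A raises IndexError: a negative op1 or op2 makes A's table
-- miss the row/column that `return f[n][op1][op2]` reads.
def Pre_solve (nums : List Int) (k : Int) (op1 : Int) (op2 : Int) : Prop := 0 ≤ op1 ∧ 0 ≤ op2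
instance (nums : List Int) (k : Int) (op1 : Int) (op2 : Int) : Decidable (Pre_solve nums k op1 op2) := by unfold Pre_solve; infer_instance

def pvWitness_solve : List Int × Int × Int × Int := ([1, 5, 3], 2, 1, 1)

def Spec_solve (nums : List Int) (k : Int) (op1 : Int) (op2 : Int) (out : Int) : Prop := out = solve_alt nums k op1 op2
instance (nums : List Int) (k : Int) (op1 : Int) (op2 : Int) (out : Int) : Decidable (Spec_solve nums k op1 op2 out) := by unfold Spec_solve; infer_instance

-- ===== CLAIM (what is proved, stated in full; the proofs are below) =====
def Claim_equal_solve : Prop := ∀ (nums : List Int) (k : Int) (op1 : Int) (op2 : Int), Dom_solve nums k op1 op2 → Pre_solve nums k op1 op2 → Spec_solve nums k op1 op2 (solve nums k op1 op2)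

-- ===== LEMMAS AND PROOFS =====

-- the common DP recurrence both programs compute: minimum sum of nums[:i] with p op1- and q op2-budget
def pvF (nums : List Int) (k : Int) : Nat → Int → Int → Int
  | 0, _, _ => 0
  | i+1, p, q =>
    let x := nums.getD i 0
    let b1 := pvF nums k i p q + x
    let b2 := if p ≠ 0 then min b1 (pvF nums k i (p-1) q + PySem.Int.floordiv (x+1) 2) else b1
    if q ≠ 0 ∧ x ≥ k then
      let b3 := min b2 (pvF nums k i p (q-1) + x - k)
      if p ≠ 0 then
        let y := if PySem.Int.floordiv (x+1) 2 ≥ k then PySem.Int.floordiv (x+1) 2 - k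
                 else PySem.Int.floordiv (x-k+1) 2
        min b3 (pvF nums k i (p-1) (q-1) + y)
      else b3
    else b2

def pvGood (nums : List Int) (k : Int) (m : PySem.Dict (Int × Int × Int) Int) : Prop :=
  ∀ (i p q v : Int), m.get? (i, p, q) = some v → ∃ j : Nat, i = (j : Int) ∧ v = pvF nums k j p q

-- ---- B side: the memo dict stays consistent with the recurrence pvF ----
theorem pvGood_insert {nums : List Int} {k : Int} {m : PySem.Dict (Int × Int × Int) Int}
    (hm : pvGood nums k m) (c p q : Int) (j : Nat) (hc : c = (j : Int)) (v : Int)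
    (hv : v = pvF nums k j p q) : pvGood nums k (m.insert (c, p, q) v) := by
  intro i' p' q' w hw
  rw [PySem.Dict.get?_insert] at hw
  by_cases h : ((i', p', q') : Int × Int × Int) = (c, p, q)
  · rw [if_pos h] at hw
    have h1 : i' = c := congrArg Prod.fst h
    have h2 : p' = p := congrArg (fun t => t.2.1) h
    have h3 : q' = q := congrArg (fun t => t.2.2) h
    exact ⟨j, by rw [h1, hc], by rw [← Option.some.inj hw, hv, h2, h3]⟩
  · rw [if_neg h] at hw
    exact hm _ _ _ _ hw

theorem pvGo_correct (nums : List Int) (k : Int) :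
    ∀ (i : Nat) (p q : Int) (m : PySem.Dict (Int × Int × Int) Int), pvGood nums k m →
      (solveAltGo nums k i p q m).1 = pvF nums k i p q ∧ pvGood nums k (solveAltGo nums k i p q m).2 := by
  intro i
  induction i with
  | zero => intro p q m hm; exact ⟨rfl, hm⟩
  | succ i ih =>
    intro p q m hm
    cases hget : m.get? (((i : Int)+1), p, q) with
    | some v =>
      obtain ⟨j, hj, hv⟩ := hm _ _ _ _ hget
      have hji : j = i + 1 := by omega
      constructor
      · simp only [solveAltGo, hget]
        rw [hv, hji]
      · simp only [solveAltGo, hget]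
        exact hm
    | none =>
      obtain ⟨e1, g1⟩ := ih p q m hm
      by_cases hp : p ≠ 0
      · by_cases hq : q ≠ 0 ∧ nums.getD i 0 ≥ k
        · obtain ⟨e2, g2⟩ := ih (p-1) q (solveAltGo nums k i p q m).2 g1
          obtain ⟨e3, g3⟩ := ih p (q-1) (solveAltGo nums k i (p-1) q (solveAltGo nums k i p q m).2).2 g2
          obtain ⟨e4, g4⟩ := ih (p-1) (q-1) (solveAltGo nums k i p (q-1) (solveAltGo nums k i (p-1) q (solveAltGo nums k i p q m).2).2).2 g3
          have hfst : (solveAltGo nums k (i+1) p q m).1 = pvF nums k (i+1) p q := by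
            simp only [solveAltGo, hget, pvF, if_pos hp, if_pos hq]
            rw [e1, e2, e3, e4]
          refine ⟨hfst, ?_⟩
          have hsnd : (solveAltGo nums k (i+1) p q m).2 =
              (solveAltGo nums k i (p-1) (q-1) (solveAltGo nums k i p (q-1) (solveAltGo nums k i (p-1) q (solveAltGo nums k i p q m).2).2).2).2.insert (((i : Int)+1), p, q) ((solveAltGo nums k (i+1) p q m).1) := by
            simp only [solveAltGo, hget, if_pos hp, if_pos hq]
          rw [hsnd, hfst]
          exact pvGood_insert g4 _ p q (i+1) (by push_cast; ring) _ rfl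
        · obtain ⟨e2, g2⟩ := ih (p-1) q (solveAltGo nums k i p q m).2 g1
          have hfst : (solveAltGo nums k (i+1) p q m).1 = pvF nums k (i+1) p q := by
            simp only [solveAltGo, hget, pvF, if_pos hp, if_neg hq]
            rw [e1, e2]
          refine ⟨hfst, ?_⟩
          have hsnd : (solveAltGo nums k (i+1) p q m).2 =
              (solveAltGo nums k i (p-1) q (solveAltGo nums k i p q m).2).2.insert (((i : Int)+1), p, q) ((solveAltGo nums k (i+1) p q m).1) := by
            simp only [solveAltGo, hget, if_pos hp, if_neg hq]
          rw [hsnd, hfst]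
          exact pvGood_insert g2 _ p q (i+1) (by push_cast; ring) _ rfl
      · by_cases hq : q ≠ 0 ∧ nums.getD i 0 ≥ k
        · obtain ⟨e3, g3⟩ := ih p (q-1) (solveAltGo nums k i p q m).2 g1
          have hfst : (solveAltGo nums k (i+1) p q m).1 = pvF nums k (i+1) p q := by
            simp only [solveAltGo, hget, pvF, if_neg hp, if_pos hq]
            rw [e1, e3]
          refine ⟨hfst, ?_⟩
          have hsnd : (solveAltGo nums k (i+1) p q m).2 =
              (solveAltGo nums k i p (q-1) (solveAltGo nums k i p q m).2).2.insert (((i : Int)+1), p, q) ((solveAltGo nums k (i+1) p q m).1) := by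
            simp only [solveAltGo, hget, if_neg hp, if_pos hq]
          rw [hsnd, hfst]
          exact pvGood_insert g3 _ p q (i+1) (by push_cast; ring) _ rfl
        · have hfst : (solveAltGo nums k (i+1) p q m).1 = pvF nums k (i+1) p q := by
            simp only [solveAltGo, hget, pvF, if_neg hp, if_neg hq]
            rw [e1]
          refine ⟨hfst, ?_⟩
          have hsnd : (solveAltGo nums k (i+1) p q m).2 =
              (solveAltGo nums k i p q m).2.insert (((i : Int)+1), p, q) ((solveAltGo nums k (i+1) p q m).1) := by
            simp only [solveAltGo, hget, if_neg hp, if_neg hq]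
          rw [hsnd, hfst]
          exact pvGood_insert g1 _ p q (i+1) (by push_cast; ring) _ rfl

theorem pvAlt_eq_F (nums : List Int) (k : Int) (op1 op2 : Int) :
    solve_alt nums k op1 op2 = pvF nums k nums.length op1 op2 := by
  have h := pvGo_correct nums k nums.length op1 op2 PySem.Dict.empty
    (fun i p q v hv => by simp [PySem.Dict.get?_empty] at hv)
  exact h.1

-- ---- A side: the 3D table row invariant ----
-- Nat-indexed table read
def pvG (f : List (List (List Int))) (j a b : Nat) : Int :=
  ((f.getD j []).getD a []).getD b 0

def pvShape (f : List (List (List Int))) (N P Q : Nat) : Prop :=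
  f.length = N ∧ ∀ row ∈ f, row.length = P ∧ ∀ r ∈ row, r.length = Q

theorem pvSet3_get_self (f : List (List (List Int))) (iI aI bI : Int) (u a b : Nat)
    (hiI : iI = (u : Int)) (haI : aI = (a : Int)) (hbI : bI = (b : Int)) (v : Int)
    (h1 : u < f.length) (h2 : a < (f.getD u []).length) (h3 : b < ((f.getD u []).getD a []).length) :
    pvG (pvSet3 f iI aI bI v) u a b = v := by
  subst hiI haI hbI
  have h2' : a < f[u].length := by simpa [List.getD_eq_getElem, h1] using h2
  have h3' : b < f[u][a].length := by simpa [List.getD_eq_getElem, h1, h2'] using h3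
  simp [pvSet3, pvG, List.getD, List.getElem?_set, h1, h2', h3', List.getElem?_eq_getElem]

theorem pvSet3_get_ne (f : List (List (List Int))) (iI aI bI : Int) (u a b : Nat)
    (hiI : iI = (u : Int)) (haI : aI = (a : Int)) (hbI : bI = (b : Int)) (v : Int)
    (j c d : Nat) (h : j ≠ u ∨ c ≠ a ∨ d ≠ b) :
    pvG (pvSet3 f iI aI bI v) j c d = pvG f j c d := by
  subst hiI haI hbI
  simp only [pvSet3, pvG, List.getD, Int.toNat_natCast]
  by_cases hj : j = u
  · subst hj
    by_cases hl : j < f.length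
    · simp only [List.getElem?_set, if_pos rfl, if_pos hl, if_true, eq_self_iff_true, Option.getD_some]
      rcases h with h | h | h
      · omega
      · rw [if_neg (by omega)]
      · by_cases hc : c = a
        · subst hc
          by_cases hr : c < (f[j]?.getD []).length
          · simp only [List.getElem?_set, if_pos rfl, if_pos hr, if_true, eq_self_iff_true, Option.getD_some]
            rw [if_neg (by omega)]
          · simp only [List.getElem?_set, if_pos rfl, if_neg hr, if_true, eq_self_iff_true]
            have hcn : (f[j]?.getD [])[c]? = none := List.getElem?_eq_none (by omega)
            simp [hcn]
        · rw [if_neg (by omega)]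
    · have hnone : f[j]? = none := List.getElem?_eq_none (by omega)
      simp only [List.getElem?_set, if_pos rfl, if_neg hl, if_true, eq_self_iff_true, hnone]
  · rw [List.getElem?_set_ne (by omega)]

theorem pvSet3_shape {N P Q : Nat} {f : List (List (List Int))} (hsh : pvShape f N P Q)
    (iI aI : Int) (u a : Nat) (hiI : iI = (u : Int)) (haI : aI = (a : Int)) (b v : Int)
    (hu : u < N) (ha : a < P) :
    pvShape (pvSet3 f iI aI b v) N P Q := by
  subst hiI haI
  obtain ⟨hlen, hrows⟩ := hsh
  have hu' : u < f.length := by omega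
  have hrowmem : f.getD u [] ∈ f := by
    rw [List.getD_eq_getElem f [] hu']
    exact List.getElem_mem hu'
  have hrowP : (f.getD u []).length = P := (hrows _ hrowmem).1
  have hla : a < (f.getD u []).length := by omega
  have hinmem : (f.getD u []).getD a [] ∈ f.getD u [] := by
    rw [List.getD_eq_getElem _ [] hla]
    exact List.getElem_mem hla
  constructor
  · simp [pvSet3, hlen]
  · intro row hrow
    simp only [pvSet3, Int.toNat_natCast] at hrow
    rcases List.mem_or_eq_of_mem_set hrow with hmem | rfl
    · exact hrows _ hmem
    · refine ⟨by rw [List.length_set]; exact hrowP, ?_⟩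
      intro r hr
      rcases List.mem_or_eq_of_mem_set hr with hmem | rfl
      · exact (hrows _ hrowmem).2 _ hmem
      · rw [List.length_set]
        exact (hrows _ hrowmem).2 _ hinmem

theorem pvShape_row_len {N P Q : Nat} {f : List (List (List Int))} (hsh : pvShape f N P Q)
    {u : Nat} (hu : u < N) : (f.getD u []).length = P := by
  obtain ⟨hlen, hrows⟩ := hsh
  have hu' : u < f.length := by omega
  rw [List.getD_eq_getElem f [] hu']
  exact (hrows _ (List.getElem_mem hu')).1

theorem pvShape_inner_len {N P Q : Nat} {f : List (List (List Int))} (hsh : pvShape f N P Q)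
    {u c : Nat} (hu : u < N) (hc : c < P) : ((f.getD u []).getD c []).length = Q := by
  obtain ⟨hlen, hrows⟩ := hsh
  have hu' : u < f.length := by omega
  rw [List.getD_eq_getElem f [] hu']
  have hrow := hrows _ (List.getElem_mem hu')
  have hc' : c < f[u].length := by omega
  rw [List.getD_eq_getElem _ [] hc']
  exact hrow.2 _ (List.getElem_mem hc')

theorem pvRes_congr (f f' : List (List (List Int))) (k x p q : Int) (s : Nat)
    (hrow : ∀ c d : Nat, pvG f s c d = pvG f' s c d) :
    pvRes f k (s : Int) x p q = pvRes f' k (s : Int) x p q := by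
  have h := hrow
  simp only [pvG] at h
  simp only [pvRes, pvGet3, Int.toNat_natCast, h]

theorem pvRes_eq_F (nums : List Int) (k : Int) (f : List (List (List Int)))
    (s a b P Q : Nat) (x : Int) (hx : x = nums.getD s 0) (ha : a < P) (hb : b < Q)
    (hrow : ∀ c d : Nat, c < P → d < Q → pvG f s c d = pvF nums k s (c : Int) (d : Int)) :
    pvRes f k (s : Int) x (a : Int) (b : Int) = pvF nums k (s+1) (a : Int) (b : Int) := by
  subst hx
  simp only [pvG] at hrow
  by_cases hpa : (a : Int) ≠ 0
  · have e1 : (a : Int) - 1 = ((a-1 : Nat) : Int) := by omega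
    by_cases hqb : (b : Int) ≠ 0 ∧ nums.getD s 0 ≥ k
    · have e2 : (b : Int) - 1 = ((b-1 : Nat) : Int) := by
        have : b ≠ 0 := by exact_mod_cast fun h => hqb.1 (by exact_mod_cast congrArg (Nat.cast : Nat → Int) h)
        omega
      simp only [pvRes, pvF, pvGet3, Int.toNat_natCast, if_pos hpa, if_pos hqb, e1, e2]
      rw [hrow a b ha hb, hrow (a-1) b (by omega) hb, hrow a (b-1) ha (by omega),
          hrow (a-1) (b-1) (by omega) (by omega)]
    · simp only [pvRes, pvF, pvGet3, Int.toNat_natCast, if_pos hpa, if_neg hqb, e1]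
      rw [hrow a b ha hb, hrow (a-1) b (by omega) hb]
  · by_cases hqb : (b : Int) ≠ 0 ∧ nums.getD s 0 ≥ k
    · have e2 : (b : Int) - 1 = ((b-1 : Nat) : Int) := by
        have : b ≠ 0 := by exact_mod_cast fun h => hqb.1 (by exact_mod_cast congrArg (Nat.cast : Nat → Int) h)
        omega
      simp only [pvRes, pvF, pvGet3, Int.toNat_natCast, if_neg hpa, if_pos hqb, e2]
      rw [hrow a b ha hb, hrow a (b-1) ha (by omega)]
    · simp only [pvRes, pvF, pvGet3, Int.toNat_natCast, if_neg hpa, if_neg hqb]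
      rw [hrow a b ha hb]

theorem pvQfold (k x : Int) (N P Q : Nat) (s a : Nat) (hs : s+1 < N) (ha : a < P) :
    ∀ (m : Nat), m ≤ Q → ∀ f, pvShape f N P Q →
    ∀ g, g = (PySem.List.pyRange 0 (m : Int) 1).foldl
        (fun f q => pvSet3 f ((s : Int)+1) (a : Int) q (pvRes f k (s : Int) x (a : Int) q)) f →
      pvShape g N P Q ∧
      (∀ j c d : Nat, (j ≠ s+1 ∨ c ≠ a) → pvG g j c d = pvG f j c d) ∧
      (∀ b : Nat, b < m → pvG g (s+1) a b = pvRes f k (s : Int) x (a : Int) (b : Int)) := by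
  intro m
  induction m with
  | zero =>
    intro _ f hsh g hg
    rw [PySem.List.pyRange_one_eq_nil (by omega)] at hg
    simp only [List.foldl_nil] at hg
    subst hg
    exact ⟨hsh, fun _ _ _ _ => rfl, fun b hb => absurd hb (by omega)⟩
  | succ m ihm =>
    intro hm f hsh g hg
    have hcast : ((m+1 : Nat) : Int) = (m : Int) + 1 := by push_cast; ring
    rw [hcast, PySem.List.pyRange_one_succ_right (by positivity), List.foldl_append] at hg
    obtain ⟨ihsh, ihun, ihval⟩ := ihm (by omega) f hsh _ rfl
    simp only [List.foldl_cons, List.foldl_nil] at hg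
    have hrow1 : ∀ c d : Nat, pvG ((PySem.List.pyRange 0 (m : Int) 1).foldl
        (fun f q => pvSet3 f ((s : Int)+1) (a : Int) q (pvRes f k (s : Int) x (a : Int) q)) f) s c d = pvG f s c d :=
      fun c d => ihun s c d (Or.inl (by omega))
    have ecast : ((s : Int) + 1) = ((s+1 : Nat) : Int) := by push_cast; ring
    constructor
    · rw [hg]
      exact pvSet3_shape ihsh _ _ (s+1) a ecast rfl _ _ hs ha
    constructor
    · intro j c d h
      rw [hg]
      rw [pvSet3_get_ne _ _ _ _ (s+1) a m ecast rfl rfl _ j c d (by tauto)]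
      exact ihun j c d h
    · intro b hb
      by_cases hbm : b = m
      · subst hbm
        rw [hg]
        have h1 : s+1 < ((PySem.List.pyRange 0 (b : Int) 1).foldl
            (fun f q => pvSet3 f ((s : Int)+1) (a : Int) q (pvRes f k (s : Int) x (a : Int) q)) f).length := by
          rw [ihsh.1]; omega
        have h2 : a < (((PySem.List.pyRange 0 (b : Int) 1).foldl
            (fun f q => pvSet3 f ((s : Int)+1) (a : Int) q (pvRes f k (s : Int) x (a : Int) q)) f).getD (s+1) []).length := by
          rw [pvShape_row_len ihsh hs]; exact ha
        have h3 : b < ((((PySem.List.pyRange 0 (b : Int) 1).foldl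
            (fun f q => pvSet3 f ((s : Int)+1) (a : Int) q (pvRes f k (s : Int) x (a : Int) q)) f).getD (s+1) []).getD a []).length := by
          rw [pvShape_inner_len ihsh hs ha]; omega
        rw [pvSet3_get_self _ _ _ _ (s+1) a b ecast rfl rfl _ h1 h2 h3]
        exact pvRes_congr _ f k x (a : Int) (b : Int) s hrow1
      · rw [hg, pvSet3_get_ne _ _ _ _ (s+1) a m ecast rfl rfl _ (s+1) a b (by omega)]
        exact ihval b (by omega)

theorem pvPfold (nums : List Int) (k : Int) (N P Q : Nat) (s : Nat) (hs : s+1 < N)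
    (x : Int) (hx : x = nums.getD s 0) :
    ∀ (mp : Nat), mp ≤ P → ∀ f, pvShape f N P Q →
    (∀ c d : Nat, c < P → d < Q → pvG f s c d = pvF nums k s (c : Int) (d : Int)) →
    ∀ g, g = (PySem.List.pyRange 0 (mp : Int) 1).foldl
        (fun f p => (PySem.List.pyRange 0 (Q : Int) 1).foldl
          (fun f q => pvSet3 f ((s : Int)+1) p q (pvRes f k (s : Int) x p q)) f) f →
      pvShape g N P Q ∧
      (∀ j c d : Nat, j ≠ s+1 → pvG g j c d = pvG f j c d) ∧
      (∀ c d : Nat, c < mp → d < Q → pvG g (s+1) c d = pvF nums k (s+1) (c : Int) (d : Int)) := by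
  intro mp
  induction mp with
  | zero =>
    intro _ f hsh hinv g hg
    rw [PySem.List.pyRange_one_eq_nil (show ((0:Nat):Int) ≤ 0 by simp)] at hg
    simp only [List.foldl_nil] at hg
    subst hg
    exact ⟨hsh, fun _ _ _ _ => rfl, fun c _ hc _ => absurd hc (by omega)⟩
  | succ mp ihm =>
    intro hm f hsh hinv g hg
    have hcast : ((mp+1 : Nat) : Int) = (mp : Int) + 1 := by push_cast; ring
    rw [hcast, PySem.List.pyRange_one_succ_right (by positivity), List.foldl_append] at hg
    obtain ⟨ihsh, ihun, ihval⟩ := ihm (by omega) f hsh hinv _ rfl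
    simp only [List.foldl_cons, List.foldl_nil] at hg
    obtain ⟨qsh, qun, qval⟩ := pvQfold k x N P Q s mp hs (by omega) Q (le_refl Q) _ ihsh g hg
    have hrow1 : ∀ c d : Nat, pvG ((PySem.List.pyRange 0 (mp : Int) 1).foldl
        (fun f p => (PySem.List.pyRange 0 (Q : Int) 1).foldl
          (fun f q => pvSet3 f ((s : Int)+1) p q (pvRes f k (s : Int) x p q)) f) f) s c d = pvG f s c d :=
      fun c d => ihun s c d (by omega)
    refine ⟨qsh, ?_, ?_⟩
    · intro j c d h
      rw [qun j c d (Or.inl h)]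
      exact ihun j c d h
    · intro c d hc hd
      by_cases hcm : c = mp
      · subst hcm
        rw [qval d hd, pvRes_congr _ f k x (c : Int) (d : Int) s hrow1]
        exact pvRes_eq_F nums k f s c d P Q x hx (by omega) hd hinv
      · rw [qun (s+1) c d (Or.inr hcm)]
        exact ihval c d (by omega) hd

theorem pvOuter (nums : List Int) (k : Int) (N P Q : Nat) (hN : N = nums.length + 1) :
    ∀ (tl : List Int) (s : Nat), s ≤ nums.length → nums.drop s = tl → ∀ f, pvShape f N P Q →
    (∀ c d : Nat, c < P → d < Q → pvG f s c d = pvF nums k s (c : Int) (d : Int)) →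
    ∀ g, g = (PySem.List.enumerate tl (s : Int)).foldl
        (fun f ix => (PySem.List.pyRange 0 (P : Int) 1).foldl
          (fun f p => (PySem.List.pyRange 0 (Q : Int) 1).foldl
            (fun f q => pvSet3 f (ix.1+1) p q (pvRes f k ix.1 ix.2 p q)) f) f) f →
      pvShape g N P Q ∧
      (∀ c d : Nat, c < P → d < Q → pvG g nums.length c d = pvF nums k nums.length (c : Int) (d : Int)) := by
  intro tl
  induction tl with
  | nil =>
    intro s hsle hdrop f hsh hinv g hg
    have hsn : s = nums.length := by
      have h := congrArg List.length hdrop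
      simp only [List.length_drop, List.length_nil] at h
      omega
    rw [PySem.List.enumerate_nil] at hg
    simp only [List.foldl_nil] at hg
    subst hg
    exact ⟨hsh, fun c d hc hd => hsn ▸ hinv c d hc hd⟩
  | cons x tl' ih =>
    intro s hsle hdrop f hsh hinv g hg
    have hlen : nums.length = s + tl'.length + 1 := by
      have h := congrArg List.length hdrop
      simp only [List.length_drop, List.length_cons] at h
      omega
    have hx : x = nums.getD s 0 := by
      have h1 : (nums.drop s)[0]? = nums[s + 0]? := List.getElem?_drop
      rw [hdrop] at h1
      simp only [List.getElem?_cons_zero, Nat.add_zero] at h1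
      simp [List.getD, ← h1]
    rw [PySem.List.enumerate_cons] at hg
    simp only [List.foldl_cons] at hg
    obtain ⟨psh, pun, pval⟩ := pvPfold nums k N P Q s (by omega) x hx P (le_refl P) f hsh hinv _ rfl
    have hdrop' : nums.drop (s+1) = tl' := by
      have : nums.drop (s+1) = (nums.drop s).drop 1 := by rw [List.drop_drop]
      rw [this, hdrop]
      rfl
    have hcast : (s : Int) + 1 = ((s+1 : Nat) : Int) := by push_cast; ring
    rw [hcast] at hg
    exact ih (s+1) (by omega) hdrop' _ psh (fun c d hc hd => pval c d hc hd) g hg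


theorem pvA_eq_F (nums : List Int) (k : Int) (op1 op2 : Int) (h1 : 0 ≤ op1) (h2 : 0 ≤ op2) :
    solve nums k op1 op2 = pvF nums k nums.length op1 op2 := by
  have hP : op1 + 1 = (((op1+1).toNat : Nat) : Int) := (Int.toNat_of_nonneg (by omega)).symm
  have hQ : op2 + 1 = (((op2+1).toNat : Nat) : Int) := (Int.toNat_of_nonneg (by omega)).symm
  have hN0 : ((nums.length : Int) + 1).toNat = nums.length + 1 := by omega
  simp only [solve]
  rw [hP, hQ]
  simp only [Int.toNat_natCast, hN0]
  have hshape0 : pvShape (List.replicate (nums.length + 1)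
      (List.replicate (op1+1).toNat (List.replicate (op2+1).toNat (0 : Int))))
      (nums.length + 1) (op1+1).toNat (op2+1).toNat := by
    refine ⟨by simp, ?_⟩
    intro row hrow
    rw [List.eq_of_mem_replicate hrow]
    refine ⟨by simp, ?_⟩
    intro r hr
    rw [List.eq_of_mem_replicate hr]
    simp
  have hinv0 : ∀ c d : Nat, c < (op1+1).toNat → d < (op2+1).toNat →
      pvG (List.replicate (nums.length + 1)
      (List.replicate (op1+1).toNat (List.replicate (op2+1).toNat (0 : Int)))) 0 c d
      = pvF nums k 0 (c : Int) (d : Int) := by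
    intro c d hc hd
    simp [pvG, pvF, List.getD, List.getElem?_replicate, hc, hd]
  obtain ⟨_, hfin⟩ := pvOuter nums k (nums.length + 1) (op1+1).toNat (op2+1).toNat rfl
    nums 0 (by omega) (by simp) _ hshape0 hinv0 _ rfl
  have hfin' := hfin op1.toNat op2.toNat (by omega) (by omega)
  simp only [pvGet3, Int.toNat_natCast]
  simp only [pvG, Nat.cast_zero] at hfin'
  rw [hfin', Int.toNat_of_nonneg h1, Int.toNat_of_nonneg h2]

-- ===== VERDICT (by name: the statement is the Claim_ definition above) =====
theorem solve_spec : Claim_equal_solve := by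
  intro nums k op1 op2 _ hpre
  unfold Spec_solve
  rw [pvA_eq_F nums k op1 op2 hpre.1 hpre.2, pvAlt_eq_F]
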